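-- pv_equiv track=rewrite | github.com/cognominal/pentomanim | manim/triplication_dfs_tree.py | has_only_five_multiple_void_regions
-- ===== SOURCE A (Python) =====
-- from typing import Dict, Iterable, List, Optional, Sequence, Set, Tuple
--
-- Coord = Tuple[int, int]
--
-- def key(rc: Coord) -> str:
--     return f"{rc[0]},{rc[1]}"
--
-- def has_only_five_multiple_void_regions(
--     rows: int,
--     cols: int,
--     allowed_keys: Set[str],
--     sorted_mask: List[Coord],
--     filled_keys: Set[str],
-- ) -> bool:
--     visited: Set[str] = set()
--     deltas: Tuple[Coord, ...] = ((-1, 0), (1, 0), (0, -1), (0, 1))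
--
--     for r, c in sorted_mask:
--         start = key((r, c))
--         if start in filled_keys or start in visited:
--             continue
--
--         region_size = 0
--         stack: List[Coord] = [(r, c)]
--         visited.add(start)
--
--         while stack:
--             cr, cc = stack.pop()
--             region_size += 1
--             for dr, dc in deltas:
--                 nr, nc = cr + dr, cc + dc
--                 if nr < 0 or nr >= rows or nc < 0 or nc >= cols:
--                     continue
--                 kk = key((nr, nc))
--                 if kk not in allowed_keys or kk in filled_keys or kk in visited:
--                     continue
--                 visited.add(kk)
--                 stack.append((nr, nc))
--
--         if region_size % 5 != 0:
--             return False
--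
--     return True
-- ===== SOURCE B (Python) =====
-- def _locate(region, rows, cols, k):
--     # first region cell that has an in-bounds neighbor whose key is k; return that neighbor
--     for x, y in region:
--         for nx, ny in ((x - 1, y), (x + 1, y), (x, y - 1), (x, y + 1)):
--             if 0 <= nx < rows and 0 <= ny < cols and f"{nx},{ny}" == k:
--                 return (nx, ny)
--     return None
--
--
-- def has_only_five_multiple_void_regions(rows, cols, allowed_keys, sorted_mask, filled_keys):
--     visited = set()
--     for r, c in sorted_mask:
--         start = f"{r},{c}"
--         if start in filled_keys or start in visited:
--             continue
--         # keys still eligible for this region's closure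
--         candidates = [k for k in allowed_keys if k not in filled_keys and k not in visited]
--         keys = {start}
--         region = [(r, c)]
--         changed = True
--         while changed:
--             changed = False
--             for k in candidates:
--                 if k in keys:
--                     continue
--                 cell = _locate(region, rows, cols, k)
--                 if cell is not None:
--                     keys.add(k)
--                     region.append(cell)
--                     changed = True
--         if len(keys) % 5:
--             return False
--         visited |= keys
--     return True
-- ===== Notes on version B (the rewrite author's own statement) =====
-- stated objective: alternative
-- what changed: A grows each region with a DFS stack (pop a cell, push its good neighbors, count pops); B instead snapshots the eligible candidate keys once per seed and repeats relaxation passes over that static candidate list, admitting a candidate when some already-admitted region cell is adjacent to it, until a pass admits nothing - a fixed-point closure over candidates with no stack or frontier - then compares the admitted-key count mod 5.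
import Mathlib
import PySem

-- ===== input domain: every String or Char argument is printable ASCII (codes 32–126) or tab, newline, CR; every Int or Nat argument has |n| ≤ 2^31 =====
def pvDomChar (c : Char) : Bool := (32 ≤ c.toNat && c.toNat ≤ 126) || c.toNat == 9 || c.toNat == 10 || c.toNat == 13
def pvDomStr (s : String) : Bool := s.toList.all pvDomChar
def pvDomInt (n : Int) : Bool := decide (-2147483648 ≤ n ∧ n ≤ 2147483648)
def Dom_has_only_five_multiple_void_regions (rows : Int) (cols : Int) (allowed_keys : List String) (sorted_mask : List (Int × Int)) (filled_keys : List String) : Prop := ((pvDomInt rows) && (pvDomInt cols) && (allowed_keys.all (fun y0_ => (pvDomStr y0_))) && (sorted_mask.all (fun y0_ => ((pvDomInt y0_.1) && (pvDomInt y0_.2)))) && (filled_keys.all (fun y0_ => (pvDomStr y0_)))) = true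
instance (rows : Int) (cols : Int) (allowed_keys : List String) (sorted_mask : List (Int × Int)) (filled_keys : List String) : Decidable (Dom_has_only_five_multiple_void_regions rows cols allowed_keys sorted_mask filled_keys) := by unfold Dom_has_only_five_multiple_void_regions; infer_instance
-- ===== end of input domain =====

-- B replaces A's per-region DFS stack (pop a cell, push good neighbors, count pops) by a
-- fixed-point closure: per seed it snapshots the still-eligible candidate keys once, then
-- repeats relaxation passes over that static list, admitting a candidate exactly when some
-- already-admitted region cell is adjacent to it, until a pass admits nothing; objective:
-- alternative algorithm, same results, not faster.

-- ===== PORT A =====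
-- key((r, c)) = f"{r},{c}"
def pvKey (r c : Int) : String := PySem.Int.toStr r ++ "," ++ PySem.Int.toStr c

def pvDeltas : List (Int × Int) := [(-1, 0), (1, 0), (0, -1), (0, 1)]

-- body of A's `for dr, dc in deltas` loop: state = (visited, stack)
def pvTryPushA (rows cols : Int) (allowed filled : List String) (cr cc : Int)
    (s : List String × List (Int × Int)) (d : Int × Int) : List String × List (Int × Int) :=
  let nr := cr + d.1
  let nc := cc + d.2
  if nr < 0 ∨ nr ≥ rows ∨ nc < 0 ∨ nc ≥ cols then s
  else
    let kk := pvKey nr nc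
    if ¬ allowed.contains kk ∨ filled.contains kk ∨ s.1.contains kk then s
    else (PySem.Set.add s.1 kk, (nr, nc) :: s.2)

-- A's `while stack` loop; the stack's head is Python's top (append = cons, pop = uncons).
-- The fuel argument is only a totality guard: it never runs out from pvOuterA's value.
def pvRegionA (rows cols : Int) (allowed filled : List String) :
    Nat → List String → List (Int × Int) → Nat → Nat × List String
  | _, visited, [], cnt => (cnt, visited)
  | 0, visited, _ :: _, cnt => (cnt, visited)
  | fuel + 1, visited, (cr, cc) :: rest, cnt =>
      let s := pvDeltas.foldl (pvTryPushA rows cols allowed filled cr cc) (visited, rest)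
      pvRegionA rows cols allowed filled fuel s.1 s.2 (cnt + 1)

-- A's `for r, c in sorted_mask` loop with early `return False`
def pvOuterA (rows cols : Int) (allowed filled : List String) :
    List (Int × Int) → List String → Bool
  | [], _ => true
  | (r, c) :: ms, visited =>
      let start := pvKey r c
      if filled.contains start || visited.contains start then
        pvOuterA rows cols allowed filled ms visited
      else
        let res := pvRegionA rows cols allowed filled (allowed.length + 1)
          (PySem.Set.add visited start) [(r, c)] 0
        if res.1 % 5 ≠ 0 then false
        else pvOuterA rows cols allowed filled ms res.2

def has_only_five_multiple_void_regions (rows : Int) (cols : Int) (allowed_keys : List String) (sorted_mask : List (Int × Int)) (filled_keys : List String) : Bool :=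
  pvOuterA rows cols allowed_keys filled_keys sorted_mask PySem.Set.empty

-- ===== PORT B =====
def pvNbrs (cr cc : Int) : List (Int × Int) := [(cr - 1, cc), (cr + 1, cc), (cr, cc - 1), (cr, cc + 1)]

-- `0 <= nx < rows and 0 <= ny < cols and f"{nx},{ny}" == k` in `_locate`
def pvHit (rows cols : Int) (k : String) (n : Int × Int) : Bool :=
  decide (0 ≤ n.1 ∧ n.1 < rows ∧ 0 ≤ n.2 ∧ n.2 < cols) && (pvKey n.1 n.2 == k)

-- B's helper `_locate`: first region cell with an in-bounds neighbor whose key is k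
def pvLocate (rows cols : Int) (k : String) : List (Int × Int) → Option (Int × Int)
  | [] => none
  | z :: rest =>
      match (pvNbrs z.1 z.2).find? (pvHit rows cols k) with
      | some n => some n
      | none => pvLocate rows cols k rest

-- body of B's `for k in candidates` pass: state = (keys, region, changed)
def pvStepB (rows cols : Int) (s : List String × List (Int × Int) × Bool) (k : String) :
    List String × List (Int × Int) × Bool :=
  if s.1.contains k then s
  else
    match pvLocate rows cols k s.2.1 with
    | some n => (PySem.Set.add s.1 k, s.2.1 ++ [n], true)
    | none => s

-- B's `while changed` loop (one recursive call per pass).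
-- The fuel argument is only a totality guard: it never runs out from pvOuterB's value.
def pvLoopB (rows cols : Int) (candidates : List String) :
    Nat → List String → List (Int × Int) → List String
  | 0, keys, _ => keys
  | fuel + 1, keys, region =>
      let s := candidates.foldl (pvStepB rows cols) (keys, region, false)
      if s.2.2 then pvLoopB rows cols candidates fuel s.1 s.2.1 else keys

-- B's `for r, c in sorted_mask` loop
def pvOuterB (rows cols : Int) (allowed filled : List String) :
    List (Int × Int) → List String → Bool
  | [], _ => true
  | (r, c) :: ms, visited =>
      let start := pvKey r c
      if filled.contains start || visited.contains start then
        pvOuterB rows cols allowed filled ms visited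
      else
        let candidates := allowed.filter (fun k => !filled.contains k && !visited.contains k)
        let keys := pvLoopB rows cols candidates (candidates.length + 1)
          (PySem.Set.add PySem.Set.empty start) [(r, c)]
        if keys.length % 5 ≠ 0 then false
        else pvOuterB rows cols allowed filled ms (PySem.Set.union visited keys)

def has_only_five_multiple_void_regions_alt (rows : Int) (cols : Int) (allowed_keys : List String) (sorted_mask : List (Int × Int)) (filled_keys : List String) : Bool :=
  pvOuterB rows cols allowed_keys filled_keys sorted_mask PySem.Set.empty

-- ===== PRECONDITION & SPEC =====
def Spec_has_only_five_multiple_void_regions (rows : Int) (cols : Int) (allowed_keys : List String) (sorted_mask : List (Int × Int)) (filled_keys : List String) (out : Bool) : Prop := out = has_only_five_multiple_void_regions_alt rows cols allowed_keys sorted_mask filled_keys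
instance (rows : Int) (cols : Int) (allowed_keys : List String) (sorted_mask : List (Int × Int)) (filled_keys : List String) (out : Bool) : Decidable (Spec_has_only_five_multiple_void_regions rows cols allowed_keys sorted_mask filled_keys out) := by unfold Spec_has_only_five_multiple_void_regions; infer_instance

-- ===== CLAIM (what is proved, stated in full; the proofs are below) =====
def Claim_equal_has_only_five_multiple_void_regions : Prop := ∀ (rows : Int) (cols : Int) (allowed_keys : List String) (sorted_mask : List (Int × Int)) (filled_keys : List String), Dom_has_only_five_multiple_void_regions rows cols allowed_keys sorted_mask filled_keys → Spec_has_only_five_multiple_void_regions rows cols allowed_keys sorted_mask filled_keys (has_only_five_multiple_void_regions rows cols allowed_keys sorted_mask filled_keys)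

-- ===== LEMMAS AND PROOFS =====

-- ## `pvKey` is injective ##

theorem pvDigitChar_isDigit {m : Nat} (h : m < 10) : (Nat.digitChar m).isDigit = true := by
  interval_cases m <;> decide

theorem pvToDigitsCore_digits :
    ∀ (f n : Nat) (acc : List Char), (∀ c ∈ acc, c.isDigit = true) →
      ∀ c ∈ Nat.toDigitsCore 10 f n acc, c.isDigit = true := by
  intro f
  induction f with
  | zero => intro n acc hacc; simpa [Nat.toDigitsCore] using hacc
  | succ f ih =>
    intro n acc hacc c hc
    rw [Nat.toDigitsCore] at hc
    by_cases h0 : n / 10 = 0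
    · simp only [h0, if_pos rfl] at hc
      rcases List.mem_cons.1 hc with h | h
      · subst h; exact pvDigitChar_isDigit (Nat.mod_lt _ (by norm_num))
      · exact hacc _ h
    · simp only [h0, if_neg h0] at hc
      refine ih (n / 10) _ ?_ c hc
      intro d hd
      rcases List.mem_cons.1 hd with h | h
      · subst h; exact pvDigitChar_isDigit (Nat.mod_lt _ (by norm_num))
      · exact hacc _ h

theorem pvToDigitsCore_append :
    ∀ (f n : Nat) (acc : List Char),
      Nat.toDigitsCore 10 f n acc = Nat.toDigitsCore 10 f n [] ++ acc := by
  intro f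
  induction f with
  | zero => intro n acc; simp [Nat.toDigitsCore]
  | succ f ih =>
    intro n acc
    rw [Nat.toDigitsCore, Nat.toDigitsCore]
    by_cases h0 : n / 10 = 0
    · simp [h0]
    · simp only [h0, if_neg h0]
      rw [ih (n / 10) [Nat.digitChar (n % 10)], ih (n / 10) (Nat.digitChar (n % 10) :: acc)]
      simp

def pvVal (cs : List Char) : Nat := cs.foldl (fun a c => 10 * a + (c.toNat - 48)) 0

theorem pvVal_digitChar {m : Nat} (h : m < 10) : (Nat.digitChar m).toNat - 48 = m := by
  interval_cases m <;> decide

theorem pvVal_toDigitsCore :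
    ∀ (f n : Nat), n < 10 ^ f → pvVal (Nat.toDigitsCore 10 f n []) = n := by
  intro f
  induction f with
  | zero => intro n hn; interval_cases n; simp [Nat.toDigitsCore, pvVal]
  | succ f ih =>
    intro n hn
    rw [Nat.toDigitsCore]
    by_cases h0 : n / 10 = 0
    · rw [if_pos h0]
      have h10 : n < 10 := by omega
      have : n % 10 = n := by omega
      simp only [pvVal, List.foldl, this]
      simpa using pvVal_digitChar h10
    · rw [if_neg h0]
      rw [pvToDigitsCore_append]
      have hlt : n / 10 < 10 ^ f := by
        rw [pow_succ] at hn; omega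
      have := ih (n / 10) hlt
      simp only [pvVal, List.foldl_append] at *
      rw [this]
      have hmod := pvVal_digitChar (Nat.mod_lt n (by norm_num : (0:Nat) < 10))
      simp only [List.foldl]
      omega

theorem pvToDigits_inj {m n : Nat} (h : Nat.toDigits 10 m = Nat.toDigits 10 n) : m = n := by
  have hm : m < 10 ^ (m + 1) := lt_of_le_of_lt (Nat.le_succ m) (Nat.lt_pow_self (by norm_num : 1 < 10) (n := _))
  have hn : n < 10 ^ (n + 1) := lt_of_le_of_lt (Nat.le_succ n) (Nat.lt_pow_self (by norm_num : 1 < 10) (n := _))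
  have := pvVal_toDigitsCore (m + 1) m hm
  rw [show Nat.toDigitsCore 10 (m+1) m [] = Nat.toDigits 10 m from rfl, h,
    show Nat.toDigits 10 n = Nat.toDigitsCore 10 (n+1) n [] from rfl,
    pvVal_toDigitsCore (n + 1) n hn] at this
  omega

theorem pvToDigits_ne_nil (n : Nat) : Nat.toDigits 10 n ≠ [] := by
  rw [Nat.toDigits, Nat.toDigitsCore]
  by_cases h0 : n / 10 = 0
  · simp [h0]
  · simp only [h0, if_neg h0]
    rw [pvToDigitsCore_append]
    simp

theorem pvToDigits_digits (n : Nat) : ∀ c ∈ Nat.toDigits 10 n, c.isDigit = true :=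
  pvToDigitsCore_digits _ _ [] (by simp)

theorem pvToChars_inj {a b : Int} (h : PySem.Int.toChars a = PySem.Int.toChars b) : a = b := by
  unfold PySem.Int.toChars at h
  by_cases ha : a < 0 <;> by_cases hb : b < 0
  · rw [if_pos ha, if_pos hb] at h
    have := pvToDigits_inj (List.cons.injEq _ _ _ _ |>.mp h).2
    omega
  · rw [if_pos ha, if_neg hb] at h
    obtain ⟨c, cs, hc⟩ := List.exists_cons_of_ne_nil (pvToDigits_ne_nil b.toNat)
    rw [hc] at h
    have hd := pvToDigits_digits b.toNat c (by rw [hc]; simp)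
    rw [← (List.cons.injEq _ _ _ _ |>.mp h).1] at hd
    simp [Char.isDigit] at hd
  · rw [if_neg ha, if_pos hb] at h
    obtain ⟨c, cs, hc⟩ := List.exists_cons_of_ne_nil (pvToDigits_ne_nil a.toNat)
    rw [hc] at h
    have hd := pvToDigits_digits a.toNat c (by rw [hc]; simp)
    rw [(List.cons.injEq _ _ _ _ |>.mp h).1] at hd
    simp [Char.isDigit] at hd
  · rw [if_neg ha, if_neg hb] at h
    have := pvToDigits_inj h
    omega

theorem pvToChars_no_comma (n : Int) : ',' ∉ PySem.Int.toChars n := by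
  unfold PySem.Int.toChars
  by_cases h : n < 0
  · rw [if_pos h]
    intro hc
    rcases List.mem_cons.1 hc with h' | h'
    · exact absurd h' (by decide)
    · have := pvToDigits_digits n.natAbs ',' h'
      simp [Char.isDigit] at this
  · rw [if_neg h]
    intro hc
    have := pvToDigits_digits n.toNat ',' hc
    simp [Char.isDigit] at this

theorem pvSplitComma :
    ∀ (l1 : List Char) (r1 : List Char) (l2 r2 : List Char), ',' ∉ l1 → ',' ∉ l2 →
      l1 ++ ',' :: r1 = l2 ++ ',' :: r2 → l1 = l2 ∧ r1 = r2 := by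
  intro l1
  induction l1 with
  | nil =>
    intro r1 l2 r2 _ h2 h
    cases l2 with
    | nil => simpa using h
    | cons c l2' =>
      simp only [List.nil_append, List.cons_append, List.cons.injEq] at h
      rw [← h.1] at h2
      simp at h2
  | cons c l1' ih =>
    intro r1 l2 r2 h1 h2 h
    cases l2 with
    | nil =>
      simp only [List.cons_append, List.nil_append, List.cons.injEq] at h
      rw [h.1] at h1
      simp at h1
    | cons d l2' =>
      simp only [List.cons_append, List.cons.injEq] at h
      obtain ⟨rfl, h'⟩ := h
      have := ih r1 l2' r2 (fun hm => h1 (List.mem_cons_of_mem _ hm))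
        (fun hm => h2 (List.mem_cons_of_mem _ hm)) h'
      exact ⟨by rw [this.1], this.2⟩

theorem pvKey_inj {r1 c1 r2 c2 : Int} (h : pvKey r1 c1 = pvKey r2 c2) : r1 = r2 ∧ c1 = c2 := by
  unfold pvKey at h
  have h' : (PySem.Int.toStr r1 ++ "," ++ PySem.Int.toStr c1).toList
      = (PySem.Int.toStr r2 ++ "," ++ PySem.Int.toStr c2).toList := by rw [h]
  simp only [String.toList_append, PySem.Int.toList_toStr] at h'
  have hs : PySem.Int.toChars r1 ++ ',' :: PySem.Int.toChars c1
      = PySem.Int.toChars r2 ++ ',' :: PySem.Int.toChars c2 := by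
    simpa using h'
  obtain ⟨e1, e2⟩ := pvSplitComma _ _ _ _ (pvToChars_no_comma r1) (pvToChars_no_comma r2) hs
  exact ⟨pvToChars_inj e1, pvToChars_inj e2⟩


-- ## basic set / list facts ##

theorem pvSet_add_of_not_mem {s : List String} {k : String} (h : k ∉ s) :
    PySem.Set.add s k = s ++ [k] := by
  simp [PySem.Set.add, PySem.Set.contains, h]

theorem pvSet_union_facts (t s : List String) (h : s.Nodup) :
    (PySem.Set.union s t).Nodup ∧ (∀ k, k ∈ PySem.Set.union s t ↔ k ∈ s ∨ k ∈ t) := by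
  induction t generalizing s with
  | nil => simpa [PySem.Set.union, PySem.Set.update] using h
  | cons x t ih =>
    have step : PySem.Set.union s (x :: t) = PySem.Set.union (PySem.Set.add s x) t := rfl
    rw [step]
    obtain ⟨h1, h2⟩ := ih (PySem.Set.add s x) (PySem.Set.nodup_add s x h)
    refine ⟨h1, fun k => ?_⟩
    rw [h2 k, PySem.Set.mem_add]
    constructor <;> intro hh <;> simp only [List.mem_cons] at * <;> tauto

theorem pvLen_eq_of_mem_iff {l1 l2 : List String} (h1 : l1.Nodup) (h2 : l2.Nodup)
    (h : ∀ k, k ∈ l1 ↔ k ∈ l2) : l1.length = l2.length :=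
  Nat.le_antisymm
    (List.subperm_of_subset h1 (fun x hx => (h x).1 hx)).length_le
    (List.subperm_of_subset h2 (fun x hx => (h x).2 hx)).length_le

-- ## the number of candidate keys not yet collected (fuel measure) ##

def pvRem (cand V : List String) : Nat :=
  ((PySem.List.dedup cand).filter (fun k => !(V.contains k))).length

theorem pvRem_le (cand V : List String) : pvRem cand V ≤ cand.length := by
  have h1 : ((PySem.List.dedup cand).filter (fun k => !(V.contains k))).length
      ≤ (PySem.List.dedup cand).length := List.length_filter_le _ _
  have h2 : (PySem.List.dedup cand).length ≤ cand.length :=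
    (List.subperm_of_subset (PySem.List.nodup_dedup cand)
      (fun x hx => (PySem.List.mem_dedup cand x).1 hx)).length_le
  exact le_trans h1 h2

theorem pvRem_add (cand V : List String) (k : String) (hk : k ∈ cand) (hnk : k ∉ V) :
    pvRem cand (V ++ [k]) + 1 = pvRem cand V := by
  unfold pvRem
  have hfe : ∀ x : String, (!((V ++ [k]).contains x)) = ((x != k) && (!(V.contains x))) := by
    intro x
    by_cases hx : x = k
    · subst hx
      simp [List.contains_iff_mem, hnk]
    · by_cases hv : x ∈ V <;> simp [List.contains_iff_mem, hx, hv]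
  rw [List.filter_congr (fun x _ => hfe x)]
  rw [← List.filter_filter]
  set m := (PySem.List.dedup cand).filter (fun k' => !(V.contains k')) with hm
  have hmnd : m.Nodup := (PySem.List.nodup_dedup cand).filter _
  have hkm : k ∈ m := by
    rw [hm, List.mem_filter]
    exact ⟨(PySem.List.mem_dedup cand k).2 hk, by simp [List.contains_iff_mem, hnk]⟩
  rw [← hmnd.erase_eq_filter k]
  have := List.length_erase_of_mem hkm
  have hpos : 0 < m.length := List.length_pos_of_mem hkm
  omega

-- ## reachability: the void region explored from a seed, avoiding `V0` ##

def pvGood (rows cols : Int) (allowed filled V0 : List String) (y : Int × Int) : Prop :=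
  0 ≤ y.1 ∧ y.1 < rows ∧ 0 ≤ y.2 ∧ y.2 < cols ∧
    pvKey y.1 y.2 ∈ allowed ∧ pvKey y.1 y.2 ∉ filled ∧ pvKey y.1 y.2 ∉ V0

inductive pvReach (rows cols : Int) (allowed filled V0 : List String) (s : Int × Int) :
    Int × Int → Prop
  | base : pvReach rows cols allowed filled V0 s s
  | step {x y : Int × Int} : pvReach rows cols allowed filled V0 s x →
      y ∈ pvNbrs x.1 x.2 → pvGood rows cols allowed filled V0 y →
      pvReach rows cols allowed filled V0 s y

theorem pvReach_congr {rows cols : Int} {allowed filled V0 V0' : List String} {s x : Int × Int}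
    (hV : ∀ k, k ∈ V0 ↔ k ∈ V0') (h : pvReach rows cols allowed filled V0 s x) :
    pvReach rows cols allowed filled V0' s x := by
  induction h with
  | base => exact pvReach.base
  | step _ hnbr hgood ih =>
    refine pvReach.step ih hnbr ?_
    obtain ⟨a, b, c, d, e, f, g⟩ := hgood
    exact ⟨a, b, c, d, e, f, fun hk => g ((hV _).2 hk)⟩

theorem pvReach_key_not_mem {rows cols : Int} {allowed filled V0 : List String} {s x : Int × Int}
    (hseed : pvKey s.1 s.2 ∉ V0) (h : pvReach rows cols allowed filled V0 s x) :
    pvKey x.1 x.2 ∉ V0 := by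
  induction h with
  | base => exact hseed
  | step _ _ hgood _ => exact hgood.2.2.2.2.2.2

theorem pvReach_closure {rows cols : Int} {allowed filled V0 : List String} {s : Int × Int}
    {R : List String} (hseed : pvKey s.1 s.2 ∈ R)
    (hclosed : ∀ x, pvReach rows cols allowed filled V0 s x → pvKey x.1 x.2 ∈ R →
      ∀ y ∈ pvNbrs x.1 x.2, pvGood rows cols allowed filled V0 y → pvKey y.1 y.2 ∈ R) :
    ∀ x, pvReach rows cols allowed filled V0 s x → pvKey x.1 x.2 ∈ R := by
  intro x h
  induction h with
  | base => exact hseed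
  | step hr hnbr hgood ih => exact hclosed _ hr ih _ hnbr hgood

-- ## neighbours vs deltas ##

theorem pvDeltas_nbrs (cr cc : Int) : ∀ d ∈ pvDeltas, (cr + d.1, cc + d.2) ∈ pvNbrs cr cc := by
  intro d hd
  fin_cases hd <;> simp [pvNbrs, sub_eq_add_neg]

theorem pvNbrs_deltas (cr cc : Int) :
    ∀ y ∈ pvNbrs cr cc, ∃ d ∈ pvDeltas, y = (cr + d.1, cc + d.2) := by
  intro y hy
  fin_cases hy
  · exact ⟨(-1, 0), by simp [pvDeltas], by simp [sub_eq_add_neg]⟩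
  · exact ⟨(1, 0), by simp [pvDeltas]⟩
  · exact ⟨(0, -1), by simp [pvDeltas], by simp [sub_eq_add_neg]⟩
  · exact ⟨(0, 1), by simp [pvDeltas]⟩



-- ## A's inner `for dr, dc in deltas` loop ##

theorem pvTryPushA_eq (rows cols : Int) (allowed filled : List String) (cr cc : Int)
    (s : List String × List (Int × Int)) (d : Int × Int) :
    pvTryPushA rows cols allowed filled cr cc s d =
      if cr + d.1 < 0 ∨ cr + d.1 ≥ rows ∨ cc + d.2 < 0 ∨ cc + d.2 ≥ cols then s
      else if ¬ allowed.contains (pvKey (cr + d.1) (cc + d.2)) = true ∨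
          filled.contains (pvKey (cr + d.1) (cc + d.2)) = true ∨
          s.1.contains (pvKey (cr + d.1) (cc + d.2)) = true then s
      else (PySem.Set.add s.1 (pvKey (cr + d.1) (cc + d.2)), (cr + d.1, cc + d.2) :: s.2) := rfl

theorem pvFoldA (rows cols : Int) (allowed filled V0 : List String) (cr cc : Int) :
    ∀ (ds : List (Int × Int)) (V : List String) (T : List (Int × Int)),
      V.Nodup → (∀ k ∈ V0, k ∈ V) →
      (∀ d ∈ ds, (cr + d.1, cc + d.2) ∈ pvNbrs cr cc) →
      ∃ W N, List.foldl (pvTryPushA rows cols allowed filled cr cc) (V, T) ds = (W, N) ∧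
        W.Nodup ∧
        (∀ k ∈ V, k ∈ W) ∧
        (∀ k ∈ W, k ∈ V ∨ ∃ y, y ∈ pvNbrs cr cc ∧ pvGood rows cols allowed filled V0 y ∧
          pvKey y.1 y.2 = k) ∧
        (∀ x ∈ T, x ∈ N) ∧
        (∀ x ∈ N, x ∈ T ∨ (x ∈ pvNbrs cr cc ∧ pvGood rows cols allowed filled V0 x ∧
          pvKey x.1 x.2 ∈ W)) ∧
        (∀ d ∈ ds, pvGood rows cols allowed filled V0 (cr + d.1, cc + d.2) →
          pvKey (cr + d.1) (cc + d.2) ∈ W) ∧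
        (∀ x : Int × Int, pvKey x.1 x.2 ∈ W → pvKey x.1 x.2 ∈ V ∨ x ∈ N) ∧
        (W.length + T.length = V.length + N.length) ∧
        (N.length + pvRem allowed W = T.length + pvRem allowed V) := by
  intro ds
  induction ds with
  | nil =>
    intro V T hnd _ _
    exact ⟨V, T, rfl, hnd, fun k hk => hk, fun k hk => Or.inl hk, fun x hx => hx,
      fun x hx => Or.inl hx, by simp, fun x hx => Or.inl hx, rfl, rfl⟩
  | cons d ds ih =>
    intro V T hnd hsub hds
    rw [List.foldl_cons, pvTryPushA_eq]
    by_cases hb : cr + d.1 < 0 ∨ cr + d.1 ≥ rows ∨ cc + d.2 < 0 ∨ cc + d.2 ≥ cols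
    · rw [if_pos hb]
      obtain ⟨W, N, heq, p1, p2, p3, p4, p5, p6, p7, p8, p9⟩ :=
        ih V T hnd hsub (fun d' hd' => hds d' (List.mem_cons_of_mem _ hd'))
      refine ⟨W, N, heq, p1, p2, p3, p4, p5, ?_, p7, p8, p9⟩
      intro d' hd' hg
      rcases List.mem_cons.1 hd' with heqd | hd'
      · rw [heqd] at hg
        obtain ⟨g1, g2, g3, g4, -⟩ := hg
        have g1' : 0 ≤ cr + d.1 := g1
        have g2' : cr + d.1 < rows := g2
        have g3' : 0 ≤ cc + d.2 := g3
        have g4' : cc + d.2 < cols := g4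
        refine absurd hb ?_
        push_neg
        exact ⟨by omega, by omega, by omega, by omega⟩
      · exact p6 d' hd' hg
    · rw [if_neg hb]
      by_cases hc : ¬ allowed.contains (pvKey (cr + d.1) (cc + d.2)) = true ∨
          filled.contains (pvKey (cr + d.1) (cc + d.2)) = true ∨
          V.contains (pvKey (cr + d.1) (cc + d.2)) = true
      · rw [if_pos hc]
        obtain ⟨W, N, heq, p1, p2, p3, p4, p5, p6, p7, p8, p9⟩ :=
          ih V T hnd hsub (fun d' hd' => hds d' (List.mem_cons_of_mem _ hd'))
        refine ⟨W, N, heq, p1, p2, p3, p4, p5, ?_, p7, p8, p9⟩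
        intro d' hd' hg
        rcases List.mem_cons.1 hd' with heqd | hd'
        · rw [heqd] at hg ⊢
          obtain ⟨-, -, -, -, g5x, g6x, -⟩ := hg
          have g5 : pvKey (cr + d.1) (cc + d.2) ∈ allowed := g5x
          have g6 : pvKey (cr + d.1) (cc + d.2) ∉ filled := g6x
          have hmem : pvKey (cr + d.1) (cc + d.2) ∈ V := by
            rcases hc with h | h | h
            · exact absurd ((List.contains_iff_mem).2 g5) h
            · exact absurd ((List.contains_iff_mem).1 h) g6
            · exact (List.contains_iff_mem).1 h
          exact p2 _ hmem
        · exact p6 d' hd' hg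
      · rw [if_neg hc]
        push_neg at hb hc
        obtain ⟨hA, hF, hV⟩ := hc
        have hAm : pvKey (cr + d.1) (cc + d.2) ∈ allowed := (List.contains_iff_mem).1
          (by revert hA; cases allowed.contains (pvKey (cr + d.1) (cc + d.2)) <;> simp)
        have hFm : pvKey (cr + d.1) (cc + d.2) ∉ filled := fun hmm =>
          (by simp [List.contains_iff_mem, hmm] at hF)
        have hVm : pvKey (cr + d.1) (cc + d.2) ∉ V := fun hmm =>
          (by simp [List.contains_iff_mem, hmm] at hV)
        have hgood : pvGood rows cols allowed filled V0 (cr + d.1, cc + d.2) :=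
          ⟨hb.1, hb.2.1, hb.2.2.1, hb.2.2.2, hAm, hFm, fun hmm => hVm (hsub _ hmm)⟩
        have hnbr : (cr + d.1, cc + d.2) ∈ pvNbrs cr cc := hds d (List.mem_cons_self ..)
        rw [pvSet_add_of_not_mem hVm]
        have hnd' : (V ++ [pvKey (cr + d.1) (cc + d.2)]).Nodup := by
          rw [List.nodup_append]
          refine ⟨hnd, List.nodup_singleton _, ?_⟩
          intro a ha b hb2 heq2
          rw [List.mem_singleton.1 hb2] at heq2
          exact hVm (heq2 ▸ ha)
        obtain ⟨W, N, heq, p1, p2, p3, p4, p5, p6, p7, p8, p9⟩ :=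
          ih (V ++ [pvKey (cr + d.1) (cc + d.2)]) ((cr + d.1, cc + d.2) :: T) hnd'
            (fun k hk => List.mem_append_left _ (hsub k hk))
            (fun d' hd' => hds d' (List.mem_cons_of_mem _ hd'))
        refine ⟨W, N, heq, p1, ?_, ?_, ?_, ?_, ?_, ?_, ?_, ?_⟩
        · exact fun k hk => p2 k (List.mem_append_left _ hk)
        · intro k hk
          rcases p3 k hk with hk' | hk'
          · rcases List.mem_append.1 hk' with h' | h'
            · exact Or.inl h'
            · exact Or.inr ⟨(cr + d.1, cc + d.2), hnbr, hgood, by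
                simpa using (List.mem_singleton.1 h').symm⟩
          · exact Or.inr hk'
        · exact fun x hx => p4 x (List.mem_cons_of_mem _ hx)
        · intro x hx
          rcases p5 x hx with hx' | hx'
          · rcases List.mem_cons.1 hx' with rfl | hx''
            · exact Or.inr ⟨hnbr, hgood, p2 _ (List.mem_append_right _ (by simp))⟩
            · exact Or.inl hx''
          · exact Or.inr hx'
        · intro d' hd' hg
          rcases List.mem_cons.1 hd' with heqd | hd'
          · subst heqd
            exact p2 _ (List.mem_append_right _ (by simp))
          · exact p6 d' hd' hg
        · intro x hx
          rcases p7 x hx with hx' | hx'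
          · rcases List.mem_append.1 hx' with h' | h'
            · exact Or.inl h'
            · have := pvKey_inj (List.mem_singleton.1 h')
              have hx2 : x = (cr + d.1, cc + d.2) := Prod.ext this.1 this.2
              exact Or.inr (by rw [hx2]; exact p4 _ (List.mem_cons_self ..))
          · exact Or.inr hx'
        · simp only [List.length_append, List.length_singleton, List.length_cons, List.length_nil] at p8 ⊢
          omega
        · have hrem := pvRem_add allowed V (pvKey (cr + d.1) (cc + d.2)) hAm hVm
          simp only [List.length_cons] at p9 ⊢
          omega

-- ## A's `while stack` loop ##

theorem pvRegionA_spec (rows cols : Int) (allowed filled V0 : List String) (s0 : Int × Int) :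
    ∀ (fuel : Nat) (V : List String) (st : List (Int × Int)) (cnt : Nat),
      V.Nodup →
      (∀ k ∈ V0, k ∈ V) →
      (∀ x ∈ st, pvReach rows cols allowed filled V0 s0 x ∧ pvKey x.1 x.2 ∈ V) →
      (∀ k ∈ V, k ∈ V0 ∨ ∃ x, pvReach rows cols allowed filled V0 s0 x ∧ pvKey x.1 x.2 = k) →
      (∀ x, pvReach rows cols allowed filled V0 s0 x → pvKey x.1 x.2 ∈ V → x ∉ st →
        ∀ y ∈ pvNbrs x.1 x.2, pvGood rows cols allowed filled V0 y → pvKey y.1 y.2 ∈ V) →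
      st.length + pvRem allowed V ≤ fuel →
      ∃ cnt' V',
        pvRegionA rows cols allowed filled fuel V st cnt = (cnt', V') ∧
        V'.Nodup ∧
        (∀ k ∈ V, k ∈ V') ∧
        (∀ k ∈ V', k ∈ V0 ∨ ∃ x, pvReach rows cols allowed filled V0 s0 x ∧ pvKey x.1 x.2 = k) ∧
        (∀ x, pvReach rows cols allowed filled V0 s0 x → pvKey x.1 x.2 ∈ V' →
          ∀ y ∈ pvNbrs x.1 x.2, pvGood rows cols allowed filled V0 y → pvKey y.1 y.2 ∈ V') ∧
        cnt' + V.length = cnt + st.length + V'.length := by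
  intro fuel
  induction fuel with
  | zero =>
    intro V st cnt hnd hsub hst hsound hproc hfuel
    cases st with
    | nil =>
      exact ⟨cnt, V, rfl, hnd, fun k hk => hk, hsound,
        fun x hx hk => hproc x hx hk (by simp), by simp⟩
    | cons hd tl => simp at hfuel
  | succ fuel ih =>
    intro V st cnt hnd hsub hst hsound hproc hfuel
    cases st with
    | nil =>
      exact ⟨cnt, V, rfl, hnd, fun k hk => hk, hsound,
        fun x hx hk => hproc x hx hk (by simp), by simp⟩
    | cons hd tl =>
      obtain ⟨cr, cc⟩ := hd
      obtain ⟨W, N, heq, p1, p2, p3, p4, p5, p6, p7, p8, p9⟩ :=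
        pvFoldA rows cols allowed filled V0 cr cc pvDeltas V tl hnd hsub (pvDeltas_nbrs cr cc)
      have hreach_cr : pvReach rows cols allowed filled V0 s0 (cr, cc) :=
        (hst (cr, cc) (List.mem_cons_self ..)).1
      have hstep : pvRegionA rows cols allowed filled (fuel + 1) V ((cr, cc) :: tl) cnt
          = pvRegionA rows cols allowed filled fuel W N (cnt + 1) := by
        show pvRegionA rows cols allowed filled fuel
          (List.foldl (pvTryPushA rows cols allowed filled cr cc) (V, tl) pvDeltas).1
          (List.foldl (pvTryPushA rows cols allowed filled cr cc) (V, tl) pvDeltas).2 (cnt + 1)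
          = _
        rw [heq]
      obtain ⟨cnt', V', heq', q1, q2, q3, q4, q5⟩ := ih W N (cnt + 1) p1
        (fun k hk => p2 k (hsub k hk))
        (by
          intro x hx
          rcases p5 x hx with hx' | ⟨hnbr, hgood, hkey⟩
          · obtain ⟨hr, hk⟩ := hst x (List.mem_cons_of_mem _ hx')
            exact ⟨hr, p2 _ hk⟩
          · exact ⟨pvReach.step hreach_cr hnbr hgood, hkey⟩)
        (by
          intro k hk
          rcases p3 k hk with hk' | ⟨y, hnbr, hgood, hkey⟩
          · exact hsound k hk'
          · exact Or.inr ⟨y, pvReach.step hreach_cr hnbr hgood, hkey⟩)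
        (by
          intro x hx hkW hxN y hnbr hgood
          have hkV : pvKey x.1 x.2 ∈ V := by
            rcases p7 x hkW with h' | h'
            · exact h'
            · exact absurd h' hxN
          by_cases hxc : x = (cr, cc)
          · have hnbr2 : y ∈ pvNbrs cr cc := by rw [hxc] at hnbr; simpa using hnbr
            obtain ⟨d, hd, rfl⟩ := pvNbrs_deltas cr cc y hnbr2
            exact p6 d hd hgood
          · have hxtl : x ∉ tl := fun hmm => hxN (p4 x hmm)
            have := hproc x hx hkV (by
              intro hmm
              rcases List.mem_cons.1 hmm with h' | h'
              · exact hxc h'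
              · exact hxtl h')
            exact p2 _ (this y hnbr hgood))
        (by
          simp only [List.length_cons] at hfuel
          omega)
      refine ⟨cnt', V', by rw [hstep, heq'], q1, fun k hk => q2 k (p2 k hk), q3, q4, ?_⟩
      simp only [List.length_cons]
      omega


-- ## B's `_locate` helper ##

theorem pvLocate_some {rows cols : Int} {k : String} :
    ∀ {R : List (Int × Int)} {n : Int × Int}, pvLocate rows cols k R = some n →
      ∃ z ∈ R, n ∈ pvNbrs z.1 z.2 ∧ (0 ≤ n.1 ∧ n.1 < rows ∧ 0 ≤ n.2 ∧ n.2 < cols) ∧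
        pvKey n.1 n.2 = k := by
  intro R
  induction R with
  | nil => intro n h; simp [pvLocate] at h
  | cons z rest ih =>
    intro n h
    rw [pvLocate] at h
    cases hf : (pvNbrs z.1 z.2).find? (pvHit rows cols k) with
    | some m =>
      rw [hf] at h
      have hmn : m = n := by simpa using h
      subst hmn
      have hp := List.find?_some hf
      have hmem := List.mem_of_find?_eq_some hf
      simp only [pvHit, Bool.and_eq_true, decide_eq_true_eq, beq_iff_eq] at hp
      exact ⟨z, List.mem_cons_self .., hmem, hp.1, hp.2⟩
    | none =>
      rw [hf] at h
      obtain ⟨z', hz', rest'⟩ := ih h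
      exact ⟨z', List.mem_cons_of_mem _ hz', rest'⟩

theorem pvLocate_none {rows cols : Int} {k : String} :
    ∀ {R : List (Int × Int)}, pvLocate rows cols k R = none →
      ∀ z ∈ R, ∀ n ∈ pvNbrs z.1 z.2,
        (0 ≤ n.1 ∧ n.1 < rows ∧ 0 ≤ n.2 ∧ n.2 < cols) → pvKey n.1 n.2 ≠ k := by
  intro R
  induction R with
  | nil => intro _ z hz; simp at hz
  | cons z rest ih =>
    intro h z' hz' n hn hb hk
    rw [pvLocate] at h
    cases hf : (pvNbrs z.1 z.2).find? (pvHit rows cols k) with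
    | some m => rw [hf] at h; simp at h
    | none =>
      rw [hf] at h
      rcases List.mem_cons.1 hz' with rfl | hz'
      · have := List.find?_eq_none.1 hf n hn
        simp only [pvHit, Bool.and_eq_true, decide_eq_true_eq, beq_iff_eq, not_and] at this
        exact this hb hk
      · exact ih h z' hz' n hn hb hk

-- ## invariants of B's pass state ##

def pvInvB (rows cols : Int) (allowed filled V0 : List String) (s0 : Int × Int)
    (K : List String) (R : List (Int × Int)) : Prop :=
  K.Nodup ∧
  (∀ z ∈ R, pvReach rows cols allowed filled V0 s0 z) ∧
  (∀ k ∈ K, ∃ z ∈ R, pvKey z.1 z.2 = k) ∧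
  (∀ z ∈ R, pvKey z.1 z.2 ∈ K)

-- ## B's `for k in candidates` pass ##

theorem pvPassB_spec (rows cols : Int) (allowed filled V0 : List String) (s0 : Int × Int)
    (cand : List String)
    (hcand : ∀ k ∈ cand, k ∈ allowed ∧ k ∉ filled ∧ k ∉ V0) :
    ∀ (ds : List String) (K : List String) (R : List (Int × Int)) (ch : Bool),
      (∀ k ∈ ds, k ∈ cand) →
      pvInvB rows cols allowed filled V0 s0 K R →
      ∃ K' R' ch',
        List.foldl (pvStepB rows cols) (K, R, ch) ds = (K', R', ch') ∧
        pvInvB rows cols allowed filled V0 s0 K' R' ∧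
        (∀ k ∈ K, k ∈ K') ∧
        pvRem cand K' ≤ pvRem cand K ∧
        (ch' = true → ch = true ∨ pvRem cand K' < pvRem cand K) ∧
        (ch = true → ch' = true) ∧
        (ch' = false → K' = K ∧ R' = R ∧
          ∀ k ∈ ds, k ∈ K ∨ pvLocate rows cols k R = none) := by
  intro ds
  induction ds with
  | nil =>
    intro K R ch _ hinv
    exact ⟨K, R, ch, rfl, hinv, fun k hk => hk, le_rfl,
      fun h => Or.inl h, fun h => h, fun h => ⟨rfl, rfl, by simp⟩⟩
  | cons k ds ih =>
    intro K R ch hds hinv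
    obtain ⟨i1, i2, i3, i4⟩ := hinv
    rw [List.foldl_cons]
    show ∃ K' R' ch', List.foldl (pvStepB rows cols) (pvStepB rows cols (K, R, ch) k) ds
      = (K', R', ch') ∧ _
    by_cases hK : K.contains k = true
    · have hstep : pvStepB rows cols (K, R, ch) k = (K, R, ch) := by
        unfold pvStepB; rw [if_pos hK]
      rw [hstep]
      obtain ⟨K', R', ch', heq, q1, q2, q3, q4, q5, q6⟩ :=
        ih K R ch (fun k' hk' => hds k' (List.mem_cons_of_mem _ hk')) ⟨i1, i2, i3, i4⟩
      refine ⟨K', R', ch', heq, q1, q2, q3, q4, q5, ?_⟩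
      intro h
      obtain ⟨e1, e2, e3⟩ := q6 h
      refine ⟨e1, e2, ?_⟩
      intro k' hk'
      rcases List.mem_cons.1 hk' with rfl | hk'
      · exact Or.inl ((List.contains_iff_mem).1 hK)
      · exact e3 k' hk'
    · have hKm : k ∉ K := fun hmm => hK ((List.contains_iff_mem).2 hmm)
      cases hloc : pvLocate rows cols k R with
      | none =>
        have hstep : pvStepB rows cols (K, R, ch) k = (K, R, ch) := by
          unfold pvStepB; rw [if_neg hK, hloc]
        rw [hstep]
        obtain ⟨K', R', ch', heq, q1, q2, q3, q4, q5, q6⟩ :=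
          ih K R ch (fun k' hk' => hds k' (List.mem_cons_of_mem _ hk')) ⟨i1, i2, i3, i4⟩
        refine ⟨K', R', ch', heq, q1, q2, q3, q4, q5, ?_⟩
        intro h
        obtain ⟨e1, e2, e3⟩ := q6 h
        refine ⟨e1, e2, ?_⟩
        intro k' hk'
        rcases List.mem_cons.1 hk' with rfl | hk'
        · exact Or.inr hloc
        · exact e3 k' hk'
      | some n =>
        have hstep : pvStepB rows cols (K, R, ch) k = (PySem.Set.add K k, R ++ [n], true) := by
          unfold pvStepB; rw [if_neg hK, hloc]
        rw [hstep, pvSet_add_of_not_mem hKm]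
        obtain ⟨z, hz, hnbr, hb, hkey⟩ := pvLocate_some hloc
        have hkc : k ∈ cand := hds k (List.mem_cons_self ..)
        obtain ⟨ha, hf, hv⟩ := hcand k hkc
        have hgood : pvGood rows cols allowed filled V0 n :=
          ⟨hb.1, hb.2.1, hb.2.2.1, hb.2.2.2, hkey ▸ ha, hkey ▸ hf, hkey ▸ hv⟩
        have hreach : pvReach rows cols allowed filled V0 s0 n :=
          pvReach.step (i2 z hz) hnbr hgood
        have hnd' : (K ++ [k]).Nodup := by
          rw [List.nodup_append]
          refine ⟨i1, List.nodup_singleton _, ?_⟩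
          intro a ha2 b hb2 heq2
          rw [List.mem_singleton.1 hb2] at heq2
          exact hKm (heq2 ▸ ha2)
        have hinv' : pvInvB rows cols allowed filled V0 s0 (K ++ [k]) (R ++ [n]) := by
          refine ⟨hnd', ?_, ?_, ?_⟩
          · intro z' hz'
            rcases List.mem_append.1 hz' with h' | h'
            · exact i2 z' h'
            · rw [List.mem_singleton.1 h']; exact hreach
          · intro k' hk'
            rcases List.mem_append.1 hk' with h' | h'
            · obtain ⟨z', hz', he⟩ := i3 k' h'
              exact ⟨z', List.mem_append_left _ hz', he⟩
            · exact ⟨n, List.mem_append_right _ (by simp), by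
                rw [List.mem_singleton.1 h'] at *; exact hkey⟩
          · intro z' hz'
            rcases List.mem_append.1 hz' with h' | h'
            · exact List.mem_append_left _ (i4 z' h')
            · rw [List.mem_singleton.1 h']
              exact List.mem_append_right _ (by simpa using hkey)
        have hrem := pvRem_add cand K k hkc hKm
        obtain ⟨K', R', ch', heq, q1, q2, q3, q4, q5, q6⟩ :=
          ih (K ++ [k]) (R ++ [n]) true
            (fun k' hk' => hds k' (List.mem_cons_of_mem _ hk')) hinv'
        refine ⟨K', R', ch', heq, q1,
          fun k' hk' => q2 k' (List.mem_append_left _ hk'), by omega,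
          fun _ => Or.inr (by omega), fun _ => q5 rfl, ?_⟩
        intro h
        exact absurd (q5 rfl) (by rw [h]; simp)

-- ## B's `while changed` loop ##

theorem pvLoopB_spec (rows cols : Int) (allowed filled V0 : List String) (s0 : Int × Int)
    (cand : List String)
    (hcand : ∀ k ∈ cand, k ∈ allowed ∧ k ∉ filled ∧ k ∉ V0)
    (hgoodc : ∀ y : Int × Int, pvGood rows cols allowed filled V0 y → pvKey y.1 y.2 ∈ cand) :
    ∀ (fuel : Nat) (K : List String) (R : List (Int × Int)),
      pvInvB rows cols allowed filled V0 s0 K R →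
      pvRem cand K + 1 ≤ fuel →
      ∃ K', pvLoopB rows cols cand fuel K R = K' ∧
        K'.Nodup ∧
        (∀ k ∈ K, k ∈ K') ∧
        (∀ k ∈ K', ∃ x, pvReach rows cols allowed filled V0 s0 x ∧ pvKey x.1 x.2 = k) ∧
        (∀ x, pvReach rows cols allowed filled V0 s0 x → pvKey x.1 x.2 ∈ K' →
          ∀ y ∈ pvNbrs x.1 x.2, pvGood rows cols allowed filled V0 y → pvKey y.1 y.2 ∈ K') := by
  intro fuel
  induction fuel with
  | zero => intro K R _ hfuel; omega
  | succ fuel ih =>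
    intro K R hinv hfuel
    obtain ⟨K1, R1, ch1, heq1, q1, q2, q3, q4, q5, q6⟩ :=
      pvPassB_spec rows cols allowed filled V0 s0 cand hcand cand K R false
        (fun k hk => hk) hinv
    have hstep : ∀ b : List String,
        pvLoopB rows cols cand (fuel + 1) K R =
          (if ch1 = true then pvLoopB rows cols cand fuel K1 R1 else K) := by
      intro _
      show (if (List.foldl (pvStepB rows cols) (K, R, false) cand).2.2 = true then
        pvLoopB rows cols cand fuel (List.foldl (pvStepB rows cols) (K, R, false) cand).1
          (List.foldl (pvStepB rows cols) (K, R, false) cand).2.1 else K) = _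
      rw [heq1]
    cases ch1 with
    | true =>
      have hlt : pvRem cand K1 < pvRem cand K := by
        rcases q4 rfl with h | h
        · exact absurd h (by simp)
        · exact h
      obtain ⟨K', heq', r1, r2, r3, r4⟩ := ih K1 R1 q1 (by omega)
      refine ⟨K', ?_, r1, fun k hk => r2 k (q2 k hk), r3, r4⟩
      rw [hstep K]
      simpa using heq'
    | false =>
      obtain ⟨e1, e2, e3⟩ := q6 rfl
      obtain ⟨i1, i2, i3, i4⟩ := hinv
      refine ⟨K, by rw [hstep K]; simp, i1, fun k hk => hk, ?_, ?_⟩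
      · intro k hk
        obtain ⟨z, hz, he⟩ := i3 k hk
        exact ⟨z, i2 z hz, he⟩
      · intro x hx hk y hnbr hgood
        by_cases hyK : pvKey y.1 y.2 ∈ K
        · exact hyK
        · exfalso
          have hyc : pvKey y.1 y.2 ∈ cand := hgoodc y hgood
          have hxR : x ∈ R := by
            obtain ⟨z, hz, he⟩ := i3 _ hk
            obtain ⟨he1, he2⟩ := pvKey_inj he
            have : z = x := Prod.ext he1 he2
            exact this ▸ hz
          rcases e3 _ hyc with h | h
          · exact hyK h
          · exact pvLocate_none h x hxR y hnbr
              ⟨hgood.1, hgood.2.1, hgood.2.2.1, hgood.2.2.2.1⟩ rfl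

-- ## the two `for r, c in sorted_mask` loops agree ##

theorem pvOuterA_cons (rows cols : Int) (allowed filled : List String) (r c : Int)
    (ms : List (Int × Int)) (V : List String) :
    pvOuterA rows cols allowed filled ((r, c) :: ms) V =
      if filled.contains (pvKey r c) || V.contains (pvKey r c) then
        pvOuterA rows cols allowed filled ms V
      else
        if (pvRegionA rows cols allowed filled (allowed.length + 1)
            (PySem.Set.add V (pvKey r c)) [(r, c)] 0).1 % 5 ≠ 0 then false
        else pvOuterA rows cols allowed filled ms
          (pvRegionA rows cols allowed filled (allowed.length + 1)
            (PySem.Set.add V (pvKey r c)) [(r, c)] 0).2 := rfl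

theorem pvOuterB_cons (rows cols : Int) (allowed filled : List String) (r c : Int)
    (ms : List (Int × Int)) (V : List String) :
    pvOuterB rows cols allowed filled ((r, c) :: ms) V =
      if filled.contains (pvKey r c) || V.contains (pvKey r c) then
        pvOuterB rows cols allowed filled ms V
      else
        if (pvLoopB rows cols (allowed.filter (fun k => !filled.contains k && !V.contains k))
            ((allowed.filter (fun k => !filled.contains k && !V.contains k)).length + 1)
            (PySem.Set.add PySem.Set.empty (pvKey r c)) [(r, c)]).length % 5 ≠ 0 then false
        else pvOuterB rows cols allowed filled ms
          (PySem.Set.union V (pvLoopB rows cols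
            (allowed.filter (fun k => !filled.contains k && !V.contains k))
            ((allowed.filter (fun k => !filled.contains k && !V.contains k)).length + 1)
            (PySem.Set.add PySem.Set.empty (pvKey r c)) [(r, c)])) := rfl

set_option maxHeartbeats 4000000 in
theorem pvOuter_eq (rows cols : Int) (allowed filled : List String) :
    ∀ (ms : List (Int × Int)) (VA VB : List String),
      VA.Nodup → VB.Nodup → (∀ k, k ∈ VA ↔ k ∈ VB) →
      pvOuterA rows cols allowed filled ms VA = pvOuterB rows cols allowed filled ms VB := by
  intro ms
  induction ms with
  | nil => intro VA VB _ _ _; rfl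
  | cons rc ms ih =>
    obtain ⟨r, c⟩ := rc
    intro VA VB hA hB hm
    have hvab : VA.contains (pvKey r c) = VB.contains (pvKey r c) := by
      by_cases h : pvKey r c ∈ VA
      · rw [(List.contains_iff_mem).2 h, ((List.contains_iff_mem).2 ((hm _).1 h))]
      · have h2 : pvKey r c ∉ VB := fun hh => h ((hm _).2 hh)
        rw [Bool.eq_false_iff.2 (fun hh => h ((List.contains_iff_mem).1 hh)),
          Bool.eq_false_iff.2 (fun hh => h2 ((List.contains_iff_mem).1 hh))]
    rw [pvOuterA_cons, pvOuterB_cons, ← hvab]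
    cases hb : (filled.contains (pvKey r c) || VA.contains (pvKey r c)) with
    | true => simpa using ih VA VB hA hB hm
    | false =>
      simp only [Bool.false_eq_true, if_false]
      have hbf : filled.contains (pvKey r c) = false ∧ VA.contains (pvKey r c) = false := by
        simpa using hb
      have hsF : pvKey r c ∉ filled := fun hh => by
        rw [(List.contains_iff_mem).2 hh] at hbf; exact absurd hbf.1 (by simp)
      have hsVA : pvKey r c ∉ VA := fun hh => by
        rw [(List.contains_iff_mem).2 hh] at hbf; exact absurd hbf.2 (by simp)
      have hsVB : pvKey r c ∉ VB := fun hh => hsVA ((hm _).2 hh)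
      have hadd : PySem.Set.add VA (pvKey r c) = VA ++ [pvKey r c] := pvSet_add_of_not_mem hsVA
      have haddB : PySem.Set.add (PySem.Set.empty : List String) (pvKey r c) = [pvKey r c] := by
        show PySem.Set.add ([] : List String) (pvKey r c) = [pvKey r c]
        rw [pvSet_add_of_not_mem (by simp : pvKey r c ∉ ([] : List String))]
        rfl
      rw [hadd, haddB]
      have hndA : (VA ++ [pvKey r c]).Nodup := by
        rw [List.nodup_append]
        refine ⟨hA, List.nodup_singleton _, ?_⟩
        intro a ha b hb2 heq2
        rw [List.mem_singleton.1 hb2] at heq2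
        exact hsVA (heq2 ▸ ha)
      -- run A's region loop
      have hyA1 : ∀ x ∈ [(r, c)], pvReach rows cols allowed filled VA (r, c) x ∧
          pvKey x.1 x.2 ∈ VA ++ [pvKey r c] := by
        intro x hx
        rw [List.mem_singleton.1 hx]
        exact ⟨pvReach.base, List.mem_append_right _ (by simp)⟩
      have hyA2 : ∀ k ∈ VA ++ [pvKey r c], k ∈ VA ∨
          ∃ x, pvReach rows cols allowed filled VA (r, c) x ∧ pvKey x.1 x.2 = k := by
        intro k hk
        rcases List.mem_append.1 hk with h | h
        · exact Or.inl h
        · exact Or.inr ⟨(r, c), pvReach.base, (List.mem_singleton.1 h).symm⟩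
      have hyA3 : ∀ x, pvReach rows cols allowed filled VA (r, c) x →
          pvKey x.1 x.2 ∈ VA ++ [pvKey r c] → x ∉ [(r, c)] →
          ∀ y ∈ pvNbrs x.1 x.2, pvGood rows cols allowed filled VA y →
          pvKey y.1 y.2 ∈ VA ++ [pvKey r c] := by
        intro x hx hk hxs
        have hnotVA : pvKey x.1 x.2 ∉ VA := pvReach_key_not_mem (s := (r, c)) hsVA hx
        rcases List.mem_append.1 hk with h | h
        · exact absurd h hnotVA
        · have := pvKey_inj (List.mem_singleton.1 h)
          exact absurd (List.mem_singleton.2 (Prod.ext this.1 this.2)) hxs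
      have hyA4 : ([(r, c)] : List (Int × Int)).length + pvRem allowed (VA ++ [pvKey r c])
          ≤ allowed.length + 1 := by
        have := pvRem_le allowed (VA ++ [pvKey r c])
        simp only [List.length_singleton]
        omega
      obtain ⟨cntA, VA', heqA, a1, a2, a3, a4, a5⟩ :=
        pvRegionA_spec rows cols allowed filled VA (r, c) (allowed.length + 1)
          (VA ++ [pvKey r c]) [(r, c)] 0 hndA
          (fun k hk => List.mem_append_left _ hk) hyA1 hyA2 hyA3 hyA4
      have completeA : ∀ x, pvReach rows cols allowed filled VA (r, c) x →
          pvKey x.1 x.2 ∈ VA' :=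
        pvReach_closure (s := (r, c)) (a2 _ (List.mem_append_right _ (by simp))) a4
      -- run B's closure loop
      set cand := allowed.filter (fun k => !filled.contains k && !VB.contains k) with hcand_def
      have hcand : ∀ k ∈ cand, k ∈ allowed ∧ k ∉ filled ∧ k ∉ VB := by
        intro k hk
        rw [hcand_def, List.mem_filter] at hk
        obtain ⟨h1, h2⟩ := hk
        simp only [Bool.and_eq_true, Bool.not_eq_true'] at h2
        exact ⟨h1, fun hh => by rw [(List.contains_iff_mem).2 hh] at h2; exact absurd h2.1 (by simp),
          fun hh => by rw [(List.contains_iff_mem).2 hh] at h2; exact absurd h2.2 (by simp)⟩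
      have hgoodc : ∀ y : Int × Int, pvGood rows cols allowed filled VB y →
          pvKey y.1 y.2 ∈ cand := by
        intro y hg
        rw [hcand_def, List.mem_filter]
        refine ⟨hg.2.2.2.2.1, ?_⟩
        simp only [Bool.and_eq_true, Bool.not_eq_true']
        constructor
        · exact Bool.eq_false_iff.2 (fun hh => hg.2.2.2.2.2.1 ((List.contains_iff_mem).1 hh))
        · exact Bool.eq_false_iff.2 (fun hh => hg.2.2.2.2.2.2 ((List.contains_iff_mem).1 hh))
      have hinv0 : pvInvB rows cols allowed filled VB (r, c) [pvKey r c] [(r, c)] := by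
        refine ⟨List.nodup_singleton _, ?_, ?_, ?_⟩
        · intro z hz; rw [List.mem_singleton.1 hz]; exact pvReach.base
        · intro k hk; exact ⟨(r, c), by simp, (List.mem_singleton.1 hk).symm⟩
        · intro z hz; rw [List.mem_singleton.1 hz]; simp
      have hfuelB : pvRem cand [pvKey r c] + 1 ≤ cand.length + 1 := by
        have := pvRem_le cand [pvKey r c]
        omega
      obtain ⟨R', heqB, b1, b2, b3, b4⟩ :=
        pvLoopB_spec rows cols allowed filled VB (r, c) cand hcand hgoodc
          (cand.length + 1) [pvKey r c] [(r, c)] hinv0 hfuelB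
      have completeB : ∀ x, pvReach rows cols allowed filled VB (r, c) x →
          pvKey x.1 x.2 ∈ R' :=
        pvReach_closure (s := (r, c)) (b2 _ (by simp)) b4
      have mem_iff : ∀ k, k ∈ VA' ↔ k ∈ VA ∨ k ∈ R' := by
        intro k
        constructor
        · intro hk
          rcases a3 k hk with h | ⟨x, hx, hkey⟩
          · exact Or.inl h
          · exact Or.inr (hkey ▸ completeB x (pvReach_congr hm hx))
        · intro hk
          rcases hk with h | h
          · exact a2 _ (List.mem_append_left _ h)
          · obtain ⟨x, hxB, hkey⟩ := b3 k h
            exact hkey ▸ completeA x (pvReach_congr (fun k' => (hm k').symm) hxB)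
      have disj : ∀ k ∈ R', k ∉ VA := by
        intro k hk hka
        obtain ⟨x, hxB, hkey⟩ := b3 k hk
        exact pvReach_key_not_mem (s := (r, c)) hsVB hxB (hkey ▸ ((hm _).1 hka))
      have hndAR : (VA ++ R').Nodup := by
        rw [List.nodup_append]
        refine ⟨hA, b1, ?_⟩
        intro a ha b hb2 heq2
        exact disj b hb2 (heq2 ▸ ha)
      have hlen : VA'.length = VA.length + R'.length := by
        have := pvLen_eq_of_mem_iff a1 hndAR
          (fun k => by rw [mem_iff k, List.mem_append])
        simpa using this
      have hcnt : cntA = R'.length := by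
        simp only [List.length_append, List.length_singleton] at a5
        omega
      rw [heqA, heqB, hcnt]
      by_cases h5 : R'.length % 5 ≠ 0
      · rw [if_pos h5, if_pos h5]
      · rw [if_neg h5, if_neg h5]
        obtain ⟨u1, u2⟩ := pvSet_union_facts R' VB hB
        refine ih VA' (PySem.Set.union VB R') a1 u1 ?_
        intro k
        rw [mem_iff k, u2 k, hm k]

-- ===== VERDICT (by name: the statement is the Claim_ definition above) =====
theorem has_only_five_multiple_void_regions_spec : Claim_equal_has_only_five_multiple_void_regions := by
  intro rows cols allowed_keys sorted_mask filled_keys _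
  unfold Spec_has_only_five_multiple_void_regions
  unfold has_only_five_multiple_void_regions has_only_five_multiple_void_regions_alt
  exact pvOuter_eq rows cols allowed_keys filled_keys sorted_mask
    PySem.Set.empty PySem.Set.empty List.nodup_nil List.nodup_nil (fun k => Iff.rfl)
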